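-- pv_equiv track=rewrite | github.com/ranjan210/digital-encoder | main.py | returnAMI
-- ===== SOURCE A (Python) =====
-- def appendToPoint(pointsX,pointsY,currX,currY):
--     pointsX.append(currX)
--     pointsY.append(currY)
--
-- def returnAMI(inputStr):
--     pointsX = []
--     pointsY = []
--     currX = 0
--     currY = 0
--     curr1 = 1
--     for a in inputStr:
--         if a == "0":
--             currY=0
--             appendToPoint(pointsX,pointsY,currX,currY)
--             currX+=1
--             appendToPoint(pointsX,pointsY,currX,currY)
--         if a == "1":
--             if curr1 == 1:
--                 currY = 1
--                 curr1 = -1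
--             else:
--                 currY = -1
--                 curr1 = 1
--             appendToPoint(pointsX,pointsY,currX,currY)
--             currX+=1
--             appendToPoint(pointsX,pointsY,currX,currY)
--
--     return pointsX,pointsY
-- ===== SOURCE B (Python) =====
-- def returnAMI(inputStr):
--     # Pass 1: signal levels per valid bit (non-'0'/'1' chars are skipped).
--     levels = []
--     ones = 0
--     for a in inputStr:
--         if a == "0":
--             levels.append(0)
--         elif a == "1":
--             levels.append(1 if ones % 2 == 0 else -1)
--             ones += 1
--     # Pass 2: emit coordinates.
--     k = len(levels)
--     pointsX = [x for i in range(k) for x in (i, i + 1)]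
--     pointsY = [y for y in levels for _ in (0, 1)]
--     return pointsX, pointsY
-- ===== Notes on version B (the rewrite author's own statement) =====
-- stated objective: alternative
-- what changed: B splits A's single interleaved append loop into two passes: first compute the list of signal levels (0 for '0', parity-alternating +-1 for '1', skipping other chars), then emit pointsX from a range comprehension and pointsY by duplicating each level.
import Mathlib
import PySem

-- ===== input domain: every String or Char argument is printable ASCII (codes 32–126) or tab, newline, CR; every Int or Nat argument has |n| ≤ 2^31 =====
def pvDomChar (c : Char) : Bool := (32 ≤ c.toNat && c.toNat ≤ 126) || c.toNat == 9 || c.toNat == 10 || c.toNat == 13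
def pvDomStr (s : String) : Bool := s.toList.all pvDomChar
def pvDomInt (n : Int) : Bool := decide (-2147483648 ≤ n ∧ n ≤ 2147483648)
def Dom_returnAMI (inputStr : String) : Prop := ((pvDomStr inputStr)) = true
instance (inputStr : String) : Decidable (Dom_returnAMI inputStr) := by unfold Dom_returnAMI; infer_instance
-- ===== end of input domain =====

-- B separates the work into two passes (levels first, then coordinates) instead of A's
-- single interleaved append loop; objective: alternative decomposition, not speed.

-- ===== PORT A =====
def appendToPoint (pointsX pointsY : List Int) (currX currY : Int) : List Int × List Int :=
  (pointsX ++ [currX], pointsY ++ [currY])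

def amiLoop : List Char → List Int → List Int → Int → Int → Int → List Int × List Int
  | [], pointsX, pointsY, _, _, _ => (pointsX, pointsY)
  | a :: rest, pointsX, pointsY, currX, currY, curr1 =>
    if a = '0' then
      let currY := (0 : Int)
      let p := appendToPoint pointsX pointsY currX currY
      let currX := currX + 1
      let p := appendToPoint p.1 p.2 currX currY
      amiLoop rest p.1 p.2 currX currY curr1
    else if a = '1' then
      if curr1 = 1 then
        let currY := (1 : Int)
        let curr1 := (-1 : Int)
        let p := appendToPoint pointsX pointsY currX currY
        let currX := currX + 1
        let p := appendToPoint p.1 p.2 currX currY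
        amiLoop rest p.1 p.2 currX currY curr1
      else
        let currY := (-1 : Int)
        let curr1 := (1 : Int)
        let p := appendToPoint pointsX pointsY currX currY
        let currX := currX + 1
        let p := appendToPoint p.1 p.2 currX currY
        amiLoop rest p.1 p.2 currX currY curr1
    else
      amiLoop rest pointsX pointsY currX currY curr1

def returnAMI (inputStr : String) : List Int × List Int :=
  amiLoop inputStr.toList [] [] 0 0 1

-- ===== PORT B =====
-- Pass 1 of Source B: the signal level of each valid bit ('0' → 0, k-th '1' → ±1 by parity).
def amiLevels : List Char → Int → List Int
  | [], _ => []
  | a :: rest, ones =>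
    if a = '0' then 0 :: amiLevels rest ones
    else if a = '1' then
      (if ones % 2 = 0 then (1 : Int) else -1) :: amiLevels rest (ones + 1)
    else amiLevels rest ones

def returnAMI_alt (inputStr : String) : List Int × List Int :=
  let levels := amiLevels inputStr.toList 0
  ((List.range levels.length).flatMap (fun (i : Nat) => [(i : Int), (i : Int) + 1]),
   levels.flatMap (fun y => [y, y]))

-- ===== PRECONDITION & SPEC =====
def Spec_returnAMI (inputStr : String) (out : List Int × List Int) : Prop := out = returnAMI_alt inputStr
instance (inputStr : String) (out : List Int × List Int) : Decidable (Spec_returnAMI inputStr out) := by unfold Spec_returnAMI; infer_instance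

-- ===== CLAIM (what is proved, stated in full; the proofs are below) =====
def Claim_equal_returnAMI : Prop := ∀ (inputStr : String), Dom_returnAMI inputStr → Spec_returnAMI inputStr (returnAMI inputStr)

-- ===== LEMMAS AND PROOFS =====

lemma rangeX_succ (k : Nat) (c : Int) :
    (List.range (k + 1)).flatMap (fun (i : Nat) => [c + (i : Int), c + (i : Int) + 1]) =
    c :: (c + 1) :: (List.range k).flatMap
      (fun (i : Nat) => [(c + 1) + (i : Int), (c + 1) + (i : Int) + 1]) := by
  rw [List.range_succ_eq_map, List.flatMap_cons, List.flatMap_map]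
  have h : (fun i : Nat => [c + ((i.succ : Nat) : Int), c + ((i.succ : Nat) : Int) + 1]) =
      (fun i : Nat => [(c + 1) + (i : Int), (c + 1) + (i : Int) + 1]) := by
    funext i
    push_cast
    simp only [List.cons.injEq, and_true]
    omega
  rw [h]
  simp

lemma amiLoop_eq (cs : List Char) : ∀ (px py : List Int) (cx cy ones : Int),
    amiLoop cs px py cx cy (if ones % 2 = 0 then 1 else -1) =
    (px ++ (List.range (amiLevels cs ones).length).flatMap
        (fun (i : Nat) => [cx + (i : Int), cx + (i : Int) + 1]),
     py ++ (amiLevels cs ones).flatMap (fun y => [y, y])) := by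
  induction cs with
  | nil => intro px py cx cy ones; simp [amiLoop, amiLevels]
  | cons a rest ih =>
    intro px py cx cy ones
    by_cases h0 : a = '0'
    · simp only [amiLoop, amiLevels, h0, appendToPoint]
      rw [ih]
      simp [rangeX_succ, List.append_assoc]
    · by_cases h1 : a = '1'
      · by_cases he : ones % 2 = 0
        · have hne : (ones + 1) % 2 ≠ 0 := by omega
          have step := ih (px ++ [cx] ++ [cx + 1]) (py ++ [1] ++ [1]) (cx + 1) 1 (ones + 1)
          rw [if_neg hne] at step
          simp only [amiLoop, amiLevels, h1, if_pos he, appendToPoint]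
          rw [step]
          simp [rangeX_succ, List.append_assoc]
        · have hodd : (ones + 1) % 2 = 0 := by omega
          have step := ih (px ++ [cx] ++ [cx + 1]) (py ++ [-1] ++ [-1]) (cx + 1) (-1) (ones + 1)
          rw [if_pos hodd] at step
          have hcurr : (if ones % 2 = 0 then (1 : Int) else -1) = -1 := if_neg he
          simp only [amiLoop, amiLevels, h1, hcurr, appendToPoint]
          have hne1 : (-1 : Int) ≠ 1 := by decide
          rw [if_neg hne1, step]
          simp [rangeX_succ, List.append_assoc]
      · simp only [amiLoop, amiLevels, if_neg h0, if_neg h1]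
        exact ih px py cx cy ones

-- ===== VERDICT (by name: the statement is the Claim_ definition above) =====
theorem returnAMI_spec : Claim_equal_returnAMI := by
  intro s _
  show returnAMI s = returnAMI_alt s
  unfold returnAMI returnAMI_alt
  have h := amiLoop_eq s.toList [] [] 0 0 0
  have e : (if (0 : Int) % 2 = 0 then (1 : Int) else -1) = 1 := rfl
  rw [e] at h
  rw [h]
  simp
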